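-- pv_equiv track=rewrite | github.com/Brandioo/SimpleCalculativeAppsGO | palindrome/Triangle3.py | palindromic_generator
-- ===== SOURCE A (Python) =====
-- def palindromic_generator(n):
--     number = 1
--     numbers = ""
--     while number <= n:
--         numbers += str(number)
--         pal_numbers = numbers + numbers[::-1][1:]
--         yield pal_numbers
--         number += 1
-- ===== SOURCE B (Python) =====
-- def palindromic_generator(n):
--     parts = [str(i) for i in range(1, n + 1)]
--     for k in range(1, n + 1):
--         s = ''.join(parts[:k])
--         yield s + s[::-1][1:]
-- ===== Notes on version B (the rewrite author's own statement) =====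
-- stated objective: alternative
-- what changed: Drops the cross-iteration string accumulator: B precomputes the list of digit-strings once, then builds each palindrome independently by joining a fresh slice parts[:k], instead of maintaining a running string across iterations.
import Mathlib
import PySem

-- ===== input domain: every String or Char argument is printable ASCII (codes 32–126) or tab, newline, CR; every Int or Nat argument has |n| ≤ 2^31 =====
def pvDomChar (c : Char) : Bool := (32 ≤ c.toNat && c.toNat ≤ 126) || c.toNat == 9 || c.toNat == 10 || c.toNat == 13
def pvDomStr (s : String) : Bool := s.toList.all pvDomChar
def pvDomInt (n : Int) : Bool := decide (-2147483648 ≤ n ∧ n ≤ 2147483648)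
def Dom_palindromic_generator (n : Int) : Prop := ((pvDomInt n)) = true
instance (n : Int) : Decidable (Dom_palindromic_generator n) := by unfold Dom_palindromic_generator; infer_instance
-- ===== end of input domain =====

-- B drops A's cross-iteration string accumulator and rebuilds each prefix fresh with a nested join; alternative decomposition, same cost class.


-- ===== PORT A =====
-- while number <= n: numbers += str(number); yield numbers + numbers[::-1][1:]
-- (the while loop over number = 1..n is the fold over pyRange 1 (n+1) 1 carrying the running string `numbers`;
--  strings are carried as List Char, turned into String only at the yield — PySem strings are exact on the list side)
def palindromic_generator (n : Int) : List String :=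
  ((PySem.List.pyRange 1 (n + 1) 1).foldl
    (fun (st : List Char × List String) (number : Int) =>
      let numbers := st.1 ++ PySem.Int.toChars number
      -- numbers[::-1] : step -1 is never an error, so getD [] is only a totalisation
      let pal_numbers := numbers ++
        PySem.List.slice ((PySem.List.slice? numbers none none (-1)).getD []) (some 1) none
      (numbers, st.2 ++ [String.ofList pal_numbers]))
    ([], [])).2

-- ===== PORT B =====
-- parts = [str(i) for i in range(1, n+1)]; for k in range(1, n+1): s = ''.join(parts[:k]); yield s + s[::-1][1:]
def palindromic_generator_alt (n : Int) : List String :=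
  let parts := (PySem.List.pyRange 1 (n + 1) 1).map PySem.Int.toChars
  (PySem.List.pyRange 1 (n + 1) 1).map (fun k =>
    let s := PySem.Chars.join [] (PySem.List.slice parts none (some k))
    String.ofList (s ++
      PySem.List.slice ((PySem.List.slice? s none none (-1)).getD []) (some 1) none))

-- ===== PRECONDITION & SPEC =====
def Spec_palindromic_generator (n : Int) (out : List String) : Prop := out = palindromic_generator_alt n
instance (n : Int) (out : List String) : Decidable (Spec_palindromic_generator n out) := by unfold Spec_palindromic_generator; infer_instance

-- ===== CLAIM (what is proved, stated in full; the proofs are below) =====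
def Claim_equal_palindromic_generator : Prop := ∀ (n : Int), Dom_palindromic_generator n → Spec_palindromic_generator n (palindromic_generator n)

-- ===== LEMMAS AND PROOFS =====

-- joining with the empty separator distributes over appending one more piece
theorem pvJoin_nil_append (l : List (List Char)) (x : List Char) :
    PySem.Chars.join [] (l ++ [x]) = PySem.Chars.join [] l ++ x := by
  induction l with
  | nil => simp [PySem.Chars.join_nil]
  | cons a t ih =>
      cases t with
      | nil => simp [PySem.Chars.join_nil, PySem.Chars.join_cons_cons] at ih ⊢
      | cons b u => simp [PySem.Chars.join_cons_cons] at ih ⊢; simpa [List.append_assoc] using congrArg (a ++ ·) ih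

-- the fresh prefix B builds for iteration k
def pvPrefix (k : Int) : List Char :=
  PySem.Chars.join [] ((PySem.List.pyRange 1 (k + 1) 1).map PySem.Int.toChars)

-- the palindrome yielded for iteration k (B's body)
def pvPal (k : Int) : String :=
  String.ofList (pvPrefix k ++
    PySem.List.slice ((PySem.List.slice? (pvPrefix k) none none (-1)).getD []) (some 1) none)

theorem pvPrefix_succ (k : Int) (hk : 0 ≤ k) :
    pvPrefix (k + 1) = pvPrefix k ++ PySem.Int.toChars (k + 1) := by
  unfold pvPrefix
  rw [show k + 1 + 1 = (k + 1) + 1 from rfl,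
      PySem.List.pyRange_one_succ_right (by omega), List.map_append]
  simp [pvJoin_nil_append]

-- the loop invariant: after processing 1..m, A's state is (B's fresh prefix for m, B's yields for 1..m)
theorem pvLoopA (m : Nat) :
    ((PySem.List.pyRange 1 ((m : Int) + 1) 1).foldl
      (fun (st : List Char × List String) (number : Int) =>
        let numbers := st.1 ++ PySem.Int.toChars number
        let pal_numbers := numbers ++
          PySem.List.slice ((PySem.List.slice? numbers none none (-1)).getD []) (some 1) none
        (numbers, st.2 ++ [String.ofList pal_numbers]))
      ([], []))
    = (pvPrefix (m : Int), (PySem.List.pyRange 1 ((m : Int) + 1) 1).map pvPal) := by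
  induction m with
  | zero =>
      rw [PySem.List.pyRange_one_eq_nil (by omega)]
      simp [pvPrefix, PySem.List.pyRange_one_eq_nil, PySem.Chars.join_nil]
  | succ m ih =>
      rw [show ((m + 1 : Nat) : Int) + 1 = ((m : Int) + 1) + 1 by push_cast; ring,
          PySem.List.pyRange_one_succ_right (by omega), List.foldl_append, ih]
      simp only [List.foldl_cons, List.foldl_nil, List.map_append, List.map_cons, List.map_nil]
      rw [← pvPrefix_succ (m : Int) (by omega)]
      refine Prod.ext (by push_cast; ring_nf) ?_
      simp only [pvPal]

-- parts[:k] of the precomputed digit-string list is exactly the fresh prefix pieces for 1..k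
theorem pvSlice_parts (n k : Int) (h0 : 0 ≤ k) (hkn : k ≤ n) :
    PySem.List.slice ((PySem.List.pyRange 1 (n + 1) 1).map PySem.Int.toChars) none (some k)
      = (PySem.List.pyRange 1 (k + 1) 1).map PySem.Int.toChars := by
  rw [PySem.List.slice_to ((PySem.List.pyRange 1 (n + 1) 1).map PySem.Int.toChars) h0,
      PySem.List.pyRange_one_append 1 (k + 1) (n + 1) (by omega) (by omega), List.map_append,
      List.take_left' (by rw [List.length_map, PySem.List.length_pyRange_one]; omega)]

-- ===== VERDICT (by name: the statement is the Claim_ definition above) =====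
theorem palindromic_generator_spec : Claim_equal_palindromic_generator := by
  intro n _
  unfold Spec_palindromic_generator palindromic_generator palindromic_generator_alt
  by_cases hn : n ≤ 0
  · rw [PySem.List.pyRange_one_eq_nil (by omega)]; rfl
  · have hn' : n = ((n.toNat : Nat) : Int) := by omega
    rw [hn', pvLoopA n.toNat]
    apply List.map_congr_left
    intro k hk
    have hkmem := (PySem.List.mem_pyRange_one).mp hk
    rw [pvSlice_parts ((n.toNat : Nat) : Int) k (by omega) (by omega)]
    rfl
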